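-- pv_equiv track=rewrite | github.com/patrickarigg/aoc-2024 | day4/day4.py | get_routes
-- ===== SOURCE A (Python) =====
-- def get_routes(i,j,grid):
--     routes = [
--         [(i,j-n) for n in range(4)],
--         [(i-n,j-n) for n in range(4)],
--         [(i-n,j) for n in range(4)],
--         [(i-n,j+n) for n in range(4)],
--         [(i,j+n) for n in range(4)],
--         [(i+n,j+n) for n in range(4)],
--         [(i+n,j) for n in range(4)],
--         [(i+n,j-n) for n in range(4)],
--     ]
--     updated_routes = []
--     for route in routes:
--         is_valid = True
--         for point in route:
--             row,col = point
--             if row < 0 or col < 0: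
--                 is_valid=False
--                 break
--             if row >= len(grid) or col >= len(grid[0]):
--                 is_valid=False
--                 break
--         if is_valid:
--             updated_routes.append(route)
--
--     return updated_routes
-- ===== SOURCE B (Python) =====
-- def get_routes(i, j, grid):
--     # Validity factors per axis: a route is valid iff its row span fits in
--     # [0, rows) and its column span fits in [0, cols), so precompute one
--     # feasibility flag per axis direction (-1, 0, +1) and combine them.
--     rows = len(grid)
--     cols = len(grid[0]) if grid else 0
--     row_ok = {-1: i - 3 >= 0 and i < rows, 0: 0 <= i < rows, 1: i >= 0 and i + 3 < rows}
--     col_ok = {-1: j - 3 >= 0 and j < cols, 0: 0 <= j < cols, 1: j >= 0 and j + 3 < cols}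
--     dirs = [(0, -1), (-1, -1), (-1, 0), (-1, 1), (0, 1), (1, 1), (1, 0), (1, -1)]
--     return [[(i + n * dr, j + n * dc) for n in range(4)]
--             for dr, dc in dirs if row_ok[dr] and col_ok[dc]]
-- ===== Notes on version B (the rewrite author's own statement) =====
-- stated objective: alternative
-- what changed: B never scans route points: it factorises validity per axis, precomputing one interval-feasibility flag for each of the three row directions and three column directions, then keeps a direction iff its row flag and column flag both hold (6 interval checks combined, vs A's per-point scan of 8 pre-built routes).
import Mathlib
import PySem

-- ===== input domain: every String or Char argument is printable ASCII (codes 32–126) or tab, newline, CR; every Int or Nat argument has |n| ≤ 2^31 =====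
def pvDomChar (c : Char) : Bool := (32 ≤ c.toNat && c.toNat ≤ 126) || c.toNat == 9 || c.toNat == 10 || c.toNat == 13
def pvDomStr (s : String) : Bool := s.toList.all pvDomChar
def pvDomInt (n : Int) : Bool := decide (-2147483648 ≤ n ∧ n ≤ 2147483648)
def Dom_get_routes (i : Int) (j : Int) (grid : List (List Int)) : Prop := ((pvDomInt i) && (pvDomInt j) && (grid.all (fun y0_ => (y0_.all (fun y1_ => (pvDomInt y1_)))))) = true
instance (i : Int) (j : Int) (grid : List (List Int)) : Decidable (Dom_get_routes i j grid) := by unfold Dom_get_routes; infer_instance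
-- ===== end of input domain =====

-- B replaces A's per-point scan of each pre-built route by a per-axis
-- factorisation of validity (objective: alternative decomposition).

-- ===== PORT A =====
-- inner 'for point in route' loop with break: false at the first out-of-bounds point.
-- 'len(grid[0])' is ported as (grid.headD []).length: Python short-circuits so it is
-- only reached when 0 ≤ row < len(grid), hence grid is nonempty there and the value agrees.
def pvCheckA (grid : List (List Int)) : List (Int × Int) → Bool
  | [] => true
  | (row, col) :: rest =>
    if row < 0 ∨ col < 0 then false
    else if row ≥ (grid.length : Int) ∨ col ≥ ((grid.headD []).length : Int) then false
    else pvCheckA grid rest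

def get_routes (i : Int) (j : Int) (grid : List (List Int)) : List (List (Int × Int)) :=
  let routes : List (List (Int × Int)) :=
    [ (PySem.List.pyRange 0 4 1).map (fun n => (i, j - n)),
      (PySem.List.pyRange 0 4 1).map (fun n => (i - n, j - n)),
      (PySem.List.pyRange 0 4 1).map (fun n => (i - n, j)),
      (PySem.List.pyRange 0 4 1).map (fun n => (i - n, j + n)),
      (PySem.List.pyRange 0 4 1).map (fun n => (i, j + n)),
      (PySem.List.pyRange 0 4 1).map (fun n => (i + n, j + n)),
      (PySem.List.pyRange 0 4 1).map (fun n => (i + n, j)),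
      (PySem.List.pyRange 0 4 1).map (fun n => (i + n, j - n)) ]
  routes.foldl (fun acc route => if pvCheckA grid route then acc ++ [route] else acc) []

-- ===== PORT B =====
-- 'len(grid[0]) if grid else 0'; the three per-axis flags are kept in dicts keyed
-- by -1/0/1 exactly as in Source B; the final list comprehension filters the direction
-- list by the two dict lookups and maps each kept direction to its route.
def get_routes_alt (i : Int) (j : Int) (grid : List (List Int)) : List (List (Int × Int)) :=
  let rows : Int := (grid.length : Int)
  let cols : Int := if grid.isEmpty then 0 else ((grid.headD []).length : Int)
  let row_ok : PySem.Dict Int Bool := PySem.Dict.ofList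
    [(-1, decide (i - 3 ≥ 0) && decide (i < rows)),
     (0, decide (0 ≤ i) && decide (i < rows)),
     (1, decide (i ≥ 0) && decide (i + 3 < rows))]
  let col_ok : PySem.Dict Int Bool := PySem.Dict.ofList
    [(-1, decide (j - 3 ≥ 0) && decide (j < cols)),
     (0, decide (0 ≤ j) && decide (j < cols)),
     (1, decide (j ≥ 0) && decide (j + 3 < cols))]
  let dirs : List (Int × Int) := [(0, -1), (-1, -1), (-1, 0), (-1, 1), (0, 1), (1, 1), (1, 0), (1, -1)]
  (dirs.filter (fun d => (row_ok.get? d.1).getD false && (col_ok.get? d.2).getD false)).map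
    (fun d => (PySem.List.pyRange 0 4 1).map (fun n => (i + n * d.1, j + n * d.2)))

-- ===== PRECONDITION & SPEC =====
def Spec_get_routes (i : Int) (j : Int) (grid : List (List Int)) (out : List (List (Int × Int))) : Prop := out = get_routes_alt i j grid
instance (i : Int) (j : Int) (grid : List (List Int)) (out : List (List (Int × Int))) : Decidable (Spec_get_routes i j grid out) := by unfold Spec_get_routes; infer_instance

-- ===== CLAIM (what is proved, stated in full; the proofs are below) =====
def Claim_equal_get_routes : Prop := ∀ (i : Int) (j : Int) (grid : List (List Int)), Dom_get_routes i j grid → Spec_get_routes i j grid (get_routes i j grid)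

-- ===== LEMMAS AND PROOFS =====

theorem pvRange4 : PySem.List.pyRange 0 4 1 = [0, 1, 2, 3] := by decide

-- ===== VERDICT (by name: the statement is the Claim_ definition above) =====
set_option maxHeartbeats 1600000 in
theorem get_routes_spec : Claim_equal_get_routes := by
  intro i j grid _
  unfold Spec_get_routes get_routes get_routes_alt
  dsimp only []
  have hcols : (if grid.isEmpty then (0:Int) else ((grid.headD []).length : Int))
      = ((grid.headD []).length : Int) := by cases grid <;> simp
  rw [hcols]
  rw [PySem.List.foldl_append_if_eq_filter, List.nil_append]
  -- A's literal route list is B's per-direction route builder mapped over B's direction list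
  rw [show
      [ (PySem.List.pyRange 0 4 1).map (fun n => (i, j - n)),
        (PySem.List.pyRange 0 4 1).map (fun n => (i - n, j - n)),
        (PySem.List.pyRange 0 4 1).map (fun n => (i - n, j)),
        (PySem.List.pyRange 0 4 1).map (fun n => (i - n, j + n)),
        (PySem.List.pyRange 0 4 1).map (fun n => (i, j + n)),
        (PySem.List.pyRange 0 4 1).map (fun n => (i + n, j + n)),
        (PySem.List.pyRange 0 4 1).map (fun n => (i + n, j)),
        (PySem.List.pyRange 0 4 1).map (fun n => (i + n, j - n)) ]
      = ([((0:Int), (-1:Int)), (-1, -1), (-1, 0), (-1, 1), (0, 1), (1, 1), (1, 0), (1, -1)]).map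
          (fun d => (PySem.List.pyRange 0 4 1).map (fun n => (i + n * d.1, j + n * d.2)))
    from by simp [pvRange4]; omega]
  rw [List.filter_map]
  -- pointwise: A's per-point scan of a direction's route = B's two per-axis dict lookups
  have hpt : ∀ d ∈ [((0:Int), (-1:Int)), (-1, -1), (-1, 0), (-1, 1), (0, 1), (1, 1), (1, 0), (1, -1)],
      ((pvCheckA grid ∘ fun d => (PySem.List.pyRange 0 4 1).map (fun n => (i + n * d.1, j + n * d.2))) d)
      = ((((PySem.Dict.ofList
            [(-1, decide (i - 3 ≥ 0) && decide (i < (grid.length : Int))),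
             (0, decide (0 ≤ i) && decide (i < (grid.length : Int))),
             (1, decide (i ≥ 0) && decide (i + 3 < (grid.length : Int)))]).get? d.1).getD false) &&
         (((PySem.Dict.ofList
            [(-1, decide (j - 3 ≥ 0) && decide (j < ((grid.headD []).length : Int))),
             (0, decide (0 ≤ j) && decide (j < ((grid.headD []).length : Int))),
             (1, decide (j ≥ 0) && decide (j + 3 < ((grid.headD []).length : Int)))]).get? d.2).getD false)) := by
    intro d hd_mem
    fin_cases hd_mem <;>
      simp only [Function.comp, pvRange4, List.map,
        PySem.Dict.ofList, PySem.Dict.update, PySem.Dict.insert, PySem.Dict.empty,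
        PySem.Dict.get?, PySem.Dict.contains, List.foldl, List.any, Option.getD] <;>
      norm_num <;> (try simp only [pvCheckA]) <;> (try split_ifs) <;>
      (try simp_all) <;> omega
  rw [List.filter_congr hpt]
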